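-- pv_equiv track=rewrite | github.com/Osmar-Junior-slz/doutorado-gpp | dockingpp/dockingpp/data/pdb_extract.py | _iter_model_lines
-- ===== SOURCE A (Python) =====
-- from typing import Iterable
--
-- def _iter_model_lines(lines: Iterable[str]) -> tuple[list[str], str | None, str | None]:
--     selected: list[str] = []
--     model_header = None
--     model_end = None
--     found_model = False
--     in_model = False
--
--     for raw_line in lines:
--         line = raw_line.rstrip("\n")
--         record = line[:6].strip().upper()
--
--         if record == "MODEL":
--             if not found_model:
--                 found_model = True
--                 in_model = True
--                 model_header = line
--             else:
--                 break
--             continue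
--
--         if record == "ENDMDL" and found_model and in_model:
--             model_end = line
--             in_model = False
--             break
--
--         if found_model and not in_model:
--             continue
--
--         selected.append(line)
--
--     return selected, model_header, model_end
-- ===== SOURCE B (Python) =====
-- from typing import Iterable
--
-- def _iter_model_lines(lines: Iterable[str]) -> tuple[list[str], str | None, str | None]:
--     # Index-based: materialize stripped lines and their record fields once,
--     # locate the MODEL boundary and the stop boundary, then assemble by slicing.
--     stripped = [l.rstrip("\n") for l in lines]
--     recs = [l[:6].strip().upper() for l in stripped]
--     try:
--         m = recs.index("MODEL")
--     except ValueError: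
--         return stripped, None, None
--     stop = next((j for j in range(m + 1, len(recs)) if recs[j] in ("MODEL", "ENDMDL")),
--                 len(recs))
--     end = stripped[stop] if stop < len(recs) and recs[stop] == "ENDMDL" else None
--     return stripped[:m] + stripped[m + 1:stop], stripped[m], end
-- ===== Notes on version B (the rewrite author's own statement) =====
-- stated objective: alternative
-- what changed: Instead of A's single stateful scan with found_model/in_model flags and an incrementally appended accumulator, B materializes the stripped lines and record fields up front, locates the first MODEL index with list.index and the stop boundary (next MODEL/ENDMDL) with an index search, and assembles the result by list slicing.
import Mathlib
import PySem

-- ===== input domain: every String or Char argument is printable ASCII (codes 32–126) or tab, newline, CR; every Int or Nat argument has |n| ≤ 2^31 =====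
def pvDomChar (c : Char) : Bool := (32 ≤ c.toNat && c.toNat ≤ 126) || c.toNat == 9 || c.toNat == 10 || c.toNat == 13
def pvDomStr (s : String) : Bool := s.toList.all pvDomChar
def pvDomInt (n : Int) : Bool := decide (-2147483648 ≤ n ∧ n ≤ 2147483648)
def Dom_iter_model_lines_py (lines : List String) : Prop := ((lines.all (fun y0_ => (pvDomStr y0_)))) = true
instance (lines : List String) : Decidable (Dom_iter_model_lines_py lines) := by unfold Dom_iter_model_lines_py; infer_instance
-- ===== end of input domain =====

-- B replaces A's stateful single scan with an index-based assembly: records are computed once, the MODEL/stop boundaries located, and the result built by slicing (alternative decomposition, same O(n)).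


-- ===== PORT A =====
-- exact port of Python's s.rstrip("\n"): drop trailing '\n' characters (used by both ports)
def pyRstripNL (s : String) : String := String.ofList ((s.toList.reverse.dropWhile (· == '\n')).reverse)

-- line[:6].strip().upper() (the record field), via PySem primitives
def pvRecord (line : String) : String := PySem.Str.upper (PySem.Str.strip (PySem.Str.slice line none (some 6)))

def iterModelLinesGoA (ls : List String) (selected : List String) (header endm : Option String)
    (found inModel : Bool) : List String × Option String × Option String :=
  match ls with
  | [] => (selected, header, endm)
  | raw :: rest =>
    let line := pyRstripNL raw
    let record := pvRecord line
    if record == "MODEL" then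
      if !found then iterModelLinesGoA rest selected (some line) endm true true
      else (selected, header, endm)
    else if record == "ENDMDL" && found && inModel then
      (selected, header, some line)
    else if found && !inModel then
      iterModelLinesGoA rest selected header endm found inModel
    else
      iterModelLinesGoA rest (selected ++ [line]) header endm found inModel

def iter_model_lines_py (lines : List String) : List String × Option String × Option String :=
  iterModelLinesGoA lines [] none none false false

-- ===== PORT B =====
-- B precomputes the stripped lines and record fields, finds the index m of the first
-- MODEL record (recs.index → PySem.List.index?), finds the stop index (first MODEL/ENDMDL
-- record after m, via next over a range generator → findIdx? on the suffix, offset by m+1),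
-- and assembles the result by slicing (nonnegative in-range slices = drop/take,
-- PySem.List.slice_natCast; the guarded stripped[stop]/recs[stop] are in range, = getD).
def iter_model_lines_py_alt (lines : List String) : List String × Option String × Option String :=
  let stripped := lines.map pyRstripNL
  let recs := stripped.map pvRecord
  match PySem.List.index? recs "MODEL" with
  | none => (stripped, none, none)
  | some m =>
    let stop := m + 1 + ((recs.drop (m+1)).findIdx? (fun r => r == "MODEL" || r == "ENDMDL")).getD (recs.drop (m+1)).length
    let endv := if stop < recs.length && recs.getD stop "" == "ENDMDL" then some (stripped.getD stop "") else none
    (stripped.take m ++ (stripped.drop (m+1)).take (stop - (m+1)), some (stripped.getD m ""), endv)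

-- ===== PRECONDITION & SPEC =====
def Spec_iter_model_lines_py (lines : List String) (out : List String × Option String × Option String) : Prop := out = iter_model_lines_py_alt lines
instance (lines : List String) (out : List String × Option String × Option String) : Decidable (Spec_iter_model_lines_py lines out) := by unfold Spec_iter_model_lines_py; infer_instance

-- ===== CLAIM =====
def Claim_equal_iter_model_lines_py : Prop := ∀ (lines : List String), Dom_iter_model_lines_py lines → Spec_iter_model_lines_py lines (iter_model_lines_py lines)

-- ===== LEMMAS AND PROOFS =====

-- records of a raw-line list
def recsOf (ls : List String) : List String := ls.map (fun l => pvRecord (pyRstripNL l))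

def pvPred (r : String) : Bool := r == "MODEL" || r == "ENDMDL"

-- number of lines A keeps after the MODEL header (recursive characterisation)
def kOf : List String → Nat
  | [] => 0
  | raw :: rest => if pvPred (pvRecord (pyRstripNL raw)) then 0 else kOf rest + 1

-- the ENDMDL line A returns (recursive characterisation)
def endOf : List String → Option String
  | [] => none
  | raw :: rest =>
    let line := pyRstripNL raw
    if pvRecord line == "ENDMDL" then some line
    else if pvRecord line == "MODEL" then none
    else endOf rest

theorem L1 (ls : List String) :
    ((recsOf ls).findIdx? pvPred).getD ls.length = kOf ls := by
  induction ls with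
  | nil => rfl
  | cons raw rest ih =>
    simp only [recsOf, List.map_cons, List.findIdx?_cons, kOf]
    by_cases h : pvPred (pvRecord (pyRstripNL raw))
    · simp [h]
    · simp only [h, Bool.false_eq_true, if_false, List.length_cons]
      cases hfi : (recsOf rest).findIdx? pvPred with
      | none => simp [recsOf] at ih ⊢; omega
      | some j => simp [recsOf] at ih ⊢; omega

theorem L2 (ls : List String) :
    (match (recsOf ls).findIdx? pvPred with
      | some j => if (recsOf ls).getD j "" == "ENDMDL" then some ((ls.map pyRstripNL).getD j "") else none
      | none => none) = endOf ls := by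
  induction ls with
  | nil => rfl
  | cons raw rest ih =>
    have hr : recsOf (raw :: rest) = pvRecord (pyRstripNL raw) :: recsOf rest := rfl
    rw [hr, List.findIdx?_cons]
    by_cases h : pvPred (pvRecord (pyRstripNL raw))
    · rw [if_pos h]
      by_cases he : pvRecord (pyRstripNL raw) == "ENDMDL"
      · simp [endOf, he, List.getD]
      · have hm : pvRecord (pyRstripNL raw) == "MODEL" := by
          simp [pvPred] at h; simp_all
        simp [endOf, he, hm, List.getD]
    · rw [if_neg h]
      have he : ¬ (pvRecord (pyRstripNL raw) == "ENDMDL") := by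
        simp [pvPred] at h; simp_all
      have hm : ¬ (pvRecord (pyRstripNL raw) == "MODEL") := by
        simp [pvPred] at h; simp_all
      cases hfi : (recsOf rest).findIdx? pvPred with
      | none =>
        have ih' := ih; rw [hfi] at ih'
        simpa [endOf, he, hm] using ih'
      | some j =>
        have ih' := ih; rw [hfi] at ih'
        simpa [endOf, he, hm, List.getD_cons_succ] using ih'

-- if findIdx? finds an index it is in range
theorem findIdx?_lt {α : Type} (p : α → Bool) (l : List α) (j : Nat)
    (h : l.findIdx? p = some j) : j < l.length := by
  have := List.findIdx?_eq_some_iff_findIdx_eq.mp h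
  omega

-- inside the model block (found = inModel = true), A keeps kOf more lines and ends at endOf
theorem goA_found (ls : List String) (sel : List String) (h : String) :
    iterModelLinesGoA ls sel (some h) none true true
      = (sel ++ (ls.map pyRstripNL).take (kOf ls), some h, endOf ls) := by
  induction ls generalizing sel with
  | nil => simp [iterModelLinesGoA, kOf, endOf]
  | cons raw rest ih =>
    simp only [iterModelLinesGoA, kOf, endOf, List.map_cons]
    by_cases hm : pvRecord (pyRstripNL raw) == "MODEL"
    · have he : ¬ (pvRecord (pyRstripNL raw) == "ENDMDL") := by simp_all
      simp [hm, he, pvPred]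
    · by_cases he : pvRecord (pyRstripNL raw) == "ENDMDL"
      · simp [hm, he, pvPred]
      · have hp : ¬ (pvPred (pvRecord (pyRstripNL raw)) = true) := by
          simp [pvPred]; simp_all
        simp [hm, he, hp, ih]

-- before any MODEL record, A copies every line
theorem goA_notfound (ls : List String) (sel : List String)
    (h : PySem.List.index? (recsOf ls) "MODEL" = none) :
    iterModelLinesGoA ls sel none none false false = (sel ++ ls.map pyRstripNL, none, none) := by
  induction ls generalizing sel with
  | nil => simp [iterModelLinesGoA]
  | cons raw rest ih =>
    have hnm : ¬ (pvRecord (pyRstripNL raw) == "MODEL") := by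
      intro hc
      have hmem : "MODEL" ∈ recsOf (raw :: rest) := by
        show "MODEL" ∈ pvRecord (pyRstripNL raw) :: recsOf rest
        rw [beq_iff_eq.mp hc]; simp
      rw [PySem.List.index?_eq_none_iff] at h
      exact h hmem
    have hrest : PySem.List.index? (recsOf rest) "MODEL" = none := by
      rw [PySem.List.index?_eq_none_iff]
      intro hc
      rw [PySem.List.index?_eq_none_iff] at h
      exact h (show "MODEL" ∈ pvRecord (pyRstripNL raw) :: recsOf rest from List.mem_cons_of_mem _ hc)
    simp only [iterModelLinesGoA, List.map_cons]
    simp [hnm, ih _ hrest]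

-- with a first MODEL at index m, A's result in closed form
theorem goA_foundAt (ls : List String) (m : Nat) (sel : List String)
    (h : PySem.List.index? (recsOf ls) "MODEL" = some m) :
    iterModelLinesGoA ls sel none none false false
      = (sel ++ ((ls.map pyRstripNL).take m ++ ((ls.map pyRstripNL).drop (m+1)).take (kOf (ls.drop (m+1)))),
         some ((ls.map pyRstripNL).getD m ""), endOf (ls.drop (m+1))) := by
  induction ls generalizing m sel with
  | nil => simp [recsOf, PySem.List.index?] at h
  | cons raw rest ih =>
    by_cases hm : pvRecord (pyRstripNL raw) == "MODEL"
    · have hMeq : pvRecord (pyRstripNL raw) = "MODEL" := beq_iff_eq.mp hm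
      have h' : PySem.List.index? (pvRecord (pyRstripNL raw) :: recsOf rest) "MODEL" = some m := h
      rw [hMeq, PySem.List.index?_cons_self] at h'
      have h0 : m = 0 := (Option.some_inj.mp h').symm
      subst h0
      simp only [iterModelLinesGoA, List.map_cons, List.take_zero, List.nil_append,
        List.drop_succ_cons, List.drop_zero, List.getD_cons_zero]
      simp [hm, goA_found]
    · have hne : pvRecord (pyRstripNL raw) ≠ "MODEL" := by simpa using hm
      have hcons : PySem.List.index? (pvRecord (pyRstripNL raw) :: recsOf rest) "MODEL"
          = Option.map (fun x => x + 1) (PySem.List.index? (recsOf rest) "MODEL") :=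
        PySem.List.index?_cons_of_ne (recsOf rest) hne
      have h' : Option.map (fun x => x + 1) (PySem.List.index? (recsOf rest) "MODEL") = some m := by
        rw [← hcons]; exact h
      cases hr : PySem.List.index? (recsOf rest) "MODEL" with
      | none => rw [hr] at h'; simp at h'
      | some m' =>
        rw [hr] at h'
        simp only [Option.map_some, Option.some_inj] at h'
        subst h'
        by_cases he : pvRecord (pyRstripNL raw) == "ENDMDL"
        · simp only [iterModelLinesGoA]
          simp only [hm, Bool.false_eq_true, if_false, he, Bool.and_false, Bool.false_and]
          simp [ih m' _ hr, List.take_succ_cons]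
        · simp only [iterModelLinesGoA]
          simp only [hm, Bool.false_eq_true, if_false, he, Bool.false_and, Bool.and_false]
          simp [ih m' _ hr, List.take_succ_cons]

-- ===== VERDICT =====
theorem iter_model_lines_py_spec : Claim_equal_iter_model_lines_py := by
  intro lines _
  unfold Spec_iter_model_lines_py iter_model_lines_py iter_model_lines_py_alt
  have hrecs : (lines.map pyRstripNL).map pvRecord = recsOf lines := by
    simp [recsOf, List.map_map]
  simp only [hrecs]
  cases hidx : PySem.List.index? (recsOf lines) "MODEL" with
  | none => simp [goA_notfound lines [] hidx]
  | some m =>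
    have hmlt : m < lines.length := by
      have := PySem.List.getElem_of_index?_eq_some hidx
      obtain ⟨hk, _⟩ := this
      simpa [recsOf] using hk
    have hdroprecs : (recsOf lines).drop (m+1) = recsOf (lines.drop (m+1)) := by
      simp [recsOf, List.map_drop]
    have hdropstr : (lines.map pyRstripNL).drop (m+1) = (lines.drop (m+1)).map pyRstripNL := by
      simp [List.map_drop]
    rw [goA_foundAt lines m [] hidx]
    simp only [List.nil_append,
      show (fun r : String => r == "MODEL" || r == "ENDMDL") = pvPred from rfl]
    have hlenrec : (recsOf lines).length = lines.length := by simp [recsOf]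
    have hk : ((recsOf (lines.drop (m+1))).findIdx? pvPred).getD (lines.drop (m+1)).length
        = kOf (lines.drop (m+1)) := L1 _
    cases hfi : (recsOf (lines.drop (m+1))).findIdx? pvPred with
    | none =>
      have hkv : kOf (lines.drop (m+1)) = (lines.drop (m+1)).length := by
        rw [← hk, hfi]; rfl
      have hstop : m + 1 + ((recsOf (lines.drop (m+1))).findIdx? pvPred).getD
          (recsOf (lines.drop (m+1))).length = lines.length := by
        rw [hfi]
        simp [recsOf]
        omega
      rw [hdroprecs, hstop]
      have hend : endOf (lines.drop (m+1)) = none := by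
        rw [← L2 (lines.drop (m+1)), hfi]
      rw [hend, hkv]
      simp [hlenrec]
    | some j =>
      have hjlt : j < (lines.drop (m+1)).length := by
        have := findIdx?_lt _ _ _ hfi
        simpa [recsOf] using this
      have hkv : kOf (lines.drop (m+1)) = j := by rw [← hk, hfi]; rfl
      have hstop : m + 1 + ((recsOf (lines.drop (m+1))).findIdx? pvPred).getD
          (recsOf (lines.drop (m+1))).length = m + 1 + j := by rw [hfi]; rfl
      rw [hdroprecs, hstop]
      have hlt : m + 1 + j < lines.length := by
        simp at hjlt; omega
      have hgetrec : (recsOf lines).getD (m+1+j) "" = (recsOf (lines.drop (m+1))).getD j "" := by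
        simp [List.getD, ← hdroprecs, List.getElem?_drop]
      have hgetstr : (lines.map pyRstripNL).getD (m+1+j) ""
          = ((lines.drop (m+1)).map pyRstripNL).getD j "" := by
        simp [List.getD, ← hdropstr, List.getElem?_drop]
      have hend : endOf (lines.drop (m+1))
          = (if (recsOf (lines.drop (m+1))).getD j "" == "ENDMDL"
             then some (((lines.drop (m+1)).map pyRstripNL).getD j "") else none) := by
        rw [← L2 (lines.drop (m+1)), hfi]
      rw [hend]
      have hltb : m + 1 + j < (recsOf lines).length := by rw [hlenrec]; exact hlt
      simp only [hltb, decide_true, Bool.true_and, hgetrec, hgetstr, hkv, hdropstr]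
      simp
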